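-- pv_equiv track=rewrite | github.com/Teagasc/Research-Paper-RAG | chat/state.py | remove_duplicate_trailing
-- ===== SOURCE A (Python) =====
-- def remove_duplicate_trailing(text: str, min_length: int = 5) -> str:
--     n = len(text)
--     if n < 2 * min_length:
--         return text
--     for l in range(n // 2, min_length - 1, -1):
--         if text[-2 * l:-l] == text[-l:]:
--             return text[:-l]
--     return text
-- ===== SOURCE B (Python) =====
-- def remove_duplicate_trailing(text: str, min_length: int = 5) -> str:
--     # Z-function on the reversed text: one linear pass instead of comparing
--     # O(n) slice pairs; z[l] >= l iff the last l chars repeat the l before them.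
--     n = len(text)
--     hi = n // 2
--     lo = min_length if min_length > 1 else 1
--     if hi < lo:
--         return text
--     r = text[::-1]
--     z = [0] * n
--     zl = zr = 0
--     for i in range(1, n):
--         k = min(z[i - zl], zr - i) if i < zr else 0
--         while i + k < n and r[k] == r[i + k]:
--             k += 1
--         z[i] = k
--         if i + k > zr:
--             zl, zr = i, i + k
--     for l in range(hi, lo - 1, -1):
--         if z[l] >= l:
--             return text[:n - l]
--     return text
-- ===== Notes on version B (the rewrite author's own statement) =====
-- stated objective: faster
-- what changed: A tries every block length l from n//2 down, comparing the two trailing length-l slices each time (quadratic character work); B computes the Z-function of the reversed text once in linear time and then reads off the largest l in [max(min_length,1), n//2] with z[l] >= l.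
import Mathlib
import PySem

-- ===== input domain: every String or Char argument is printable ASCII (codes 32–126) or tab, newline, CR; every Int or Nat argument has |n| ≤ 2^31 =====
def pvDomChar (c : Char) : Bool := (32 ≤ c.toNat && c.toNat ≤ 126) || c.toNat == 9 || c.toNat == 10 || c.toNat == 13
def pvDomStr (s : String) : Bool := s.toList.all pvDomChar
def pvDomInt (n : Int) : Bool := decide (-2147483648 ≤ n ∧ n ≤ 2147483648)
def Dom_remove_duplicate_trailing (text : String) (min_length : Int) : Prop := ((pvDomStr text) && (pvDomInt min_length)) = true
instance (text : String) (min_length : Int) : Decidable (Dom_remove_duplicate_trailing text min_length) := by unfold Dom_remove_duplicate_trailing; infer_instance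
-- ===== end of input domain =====

-- B replaces A's quadratic scan over slice pairs by one linear Z-function pass
-- over the reversed text; equal return value proved on all inputs.

-- ===== PORT A =====
-- the for-loop of A: first l whose two trailing blocks of length l coincide wins
def pvALoop (cs : List Char) (fb : String) : List Int → String
  | [] => fb
  | l :: rest =>
      if PySem.List.slice cs (some (-(2 * l))) (some (-l)) = PySem.List.slice cs (some (-l)) none then
        String.ofList (PySem.List.slice cs none (some (-l)))
      else pvALoop cs fb rest

def remove_duplicate_trailing (text : String) (min_length : Int) : String :=
  let cs := text.toList
  let n : Int := cs.length
  if n < 2 * min_length then text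
  else pvALoop cs text (PySem.List.pyRange (PySem.Int.floordiv n 2) (min_length - 1) (-1))

-- ===== PORT B =====
-- the inner while-loop of B: extend the match r[k..] vs r[i+k..]
def pvZExtend (s : List Char) (i k : Nat) : Nat :=
  if i + k < s.length ∧ s.getD k ' ' = s.getD (i + k) ' ' then pvZExtend s i (k + 1) else k
termination_by s.length - (i + k)
decreasing_by omega

-- the main Z-function for-loop of B over i = 1 … n-1, state (z, zl, zr)
def pvZLoop (s : List Char) (i : Nat) (z : List Nat) (zl zr : Nat) : List Nat :=
  if i < s.length then
    let k0 := if i < zr then min (PySem.List.pyGetD z ((i - zl : Nat) : Int) 0) (zr - i) else 0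
    let k := pvZExtend s i k0
    let z' := PySem.List.pySetD z (i : Int) k
    if i + k > zr then pvZLoop s (i + 1) z' i (i + k) else pvZLoop s (i + 1) z' zl zr
  else z
termination_by s.length - i

-- the final for-loop of B: first l (descending) with z[l] >= l wins
def pvScan (text : String) (n : Int) (z : List Nat) : List Int → String
  | [] => text
  | l :: rest =>
      if l ≤ ((PySem.List.pyGetD z l 0 : Nat) : Int) then
        String.ofList (PySem.List.slice text.toList none (some (n - l)))
      else pvScan text n z rest

def remove_duplicate_trailing_alt (text : String) (min_length : Int) : String :=
  let cs := text.toList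
  let n := cs.length
  let hi : Int := PySem.Int.floordiv (n : Int) 2
  let lo : Int := if min_length > 1 then min_length else 1
  if hi < lo then text
  else
    let r := cs.reverse
    let z := pvZLoop r 1 (List.replicate n 0) 0 0
    pvScan text (n : Int) z (PySem.List.pyRange hi (lo - 1) (-1))

-- ===== PRECONDITION & SPEC =====
def Spec_remove_duplicate_trailing (text : String) (min_length : Int) (out : String) : Prop := out = remove_duplicate_trailing_alt text min_length
instance (text : String) (min_length : Int) (out : String) : Decidable (Spec_remove_duplicate_trailing text min_length out) := by unfold Spec_remove_duplicate_trailing; infer_instance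

-- ===== CLAIM (what is proved, stated in full; the proofs are below) =====
def Claim_equal_remove_duplicate_trailing : Prop := ∀ (text : String) (min_length : Int), Dom_remove_duplicate_trailing text min_length → Spec_remove_duplicate_trailing text min_length (remove_duplicate_trailing text min_length)

-- ===== LEMMAS AND PROOFS =====

-- longest common prefix of two character lists
def pvLcp : List Char → List Char → Nat
  | a :: as, b :: bs => if a = b then pvLcp as bs + 1 else 0
  | _, _ => 0

theorem pvLcp_ge_iff (a : List Char) : ∀ (b : List Char) (k : Nat),
    k ≤ pvLcp a b ↔ k ≤ a.length ∧ k ≤ b.length ∧ a.take k = b.take k := by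
  induction a with
  | nil => intro b k; cases k <;> simp [pvLcp]
  | cons x as ih =>
    intro b k
    cases b with
    | nil => cases k <;> simp [pvLcp]
    | cons y bs =>
      cases k with
      | zero => simp
      | succ k =>
        by_cases hxy : x = y
        · subst hxy
          simp [pvLcp, ih bs k]
        · simp [pvLcp, hxy]

theorem pvLcp_le_right (a b : List Char) : pvLcp a b ≤ b.length :=
  ((pvLcp_ge_iff a b (pvLcp a b)).mp le_rfl).2.1

theorem pvLcp_take (a b : List Char) : a.take (pvLcp a b) = b.take (pvLcp a b) :=
  ((pvLcp_ge_iff a b (pvLcp a b)).mp le_rfl).2.2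

theorem pvLcp_getElem? (a b : List Char) (j : Nat) (hj : j < pvLcp a b) : a[j]? = b[j]? := by
  have h := pvLcp_take a b
  calc a[j]? = (a.take (pvLcp a b))[j]? := (List.getElem?_take_of_lt hj).symm
    _ = (b.take (pvLcp a b))[j]? := by rw [h]
    _ = b[j]? := List.getElem?_take_of_lt hj

theorem pvLcp_mismatch (a b : List Char) (h1 : pvLcp a b < a.length) (h2 : pvLcp a b < b.length) :
    a[pvLcp a b]? ≠ b[pvLcp a b]? := by
  intro heq
  have htake : a.take (pvLcp a b + 1) = b.take (pvLcp a b + 1) := by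
    rw [List.take_add_one, List.take_add_one, pvLcp_take a b, heq]
  have := (pvLcp_ge_iff a b (pvLcp a b + 1)).mpr ⟨by omega, by omega, htake⟩
  omega

theorem pvZExtend_lcp (s : List Char) (i k : Nat) (hk : k ≤ pvLcp s (s.drop i)) :
    pvZExtend s i k = pvLcp s (s.drop i) := by
  revert hk
  induction k using pvZExtend.induct s i with
  | case1 k h ih =>
    intro hk
    rw [pvZExtend, if_pos h]
    apply ih
    rcases Nat.lt_or_ge k (pvLcp s (s.drop i)) with hlt | hge
    · omega
    · exfalso
      have hkL : pvLcp s (s.drop i) = k := by omega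
      have hm := pvLcp_mismatch s (s.drop i) (by omega) (by rw [List.length_drop]; omega)
      apply hm
      rw [hkL, List.getElem?_drop, List.getElem?_eq_getElem (by omega : k < s.length),
        List.getElem?_eq_getElem (h.1 : i + k < s.length)]
      have hchars : s[k] = s[i + k] := by
        rw [← List.getD_eq_getElem s ' ' (by omega : k < s.length),
          ← List.getD_eq_getElem s ' ' (h.1 : i + k < s.length)]
        exact h.2
      exact congrArg some hchars
  | case2 k h =>
    intro hk
    rw [pvZExtend, if_neg h]
    by_contra hne
    have hklt : k < pvLcp s (s.drop i) := by omega
    apply h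
    have hlen := pvLcp_le_right s (s.drop i)
    rw [List.length_drop] at hlen
    refine ⟨by omega, ?_⟩
    have he := pvLcp_getElem? s (s.drop i) k hklt
    rw [List.getElem?_drop] at he
    rw [List.getD_eq_getElem?_getD, List.getD_eq_getElem?_getD, he]

theorem pvBox_bound (s : List Char) (zl i zr : Nat) (hzl : zl ≤ i) (hir : i < zr)
    (hzr : zr ≤ s.length) (hbox : zr - zl ≤ pvLcp s (s.drop zl)) :
    min (pvLcp s (s.drop (i - zl))) (zr - i) ≤ pvLcp s (s.drop i) := by
  apply (pvLcp_ge_iff s (s.drop i) _).mpr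
  refine ⟨by omega, by rw [List.length_drop]; omega, ?_⟩
  apply List.ext_getElem?
  intro j
  by_cases hj : j < min (pvLcp s (s.drop (i - zl))) (zr - i)
  · rw [List.getElem?_take_of_lt hj, List.getElem?_take_of_lt hj, List.getElem?_drop]
    have h1 : s[j]? = s[(i - zl) + j]? := by
      have := pvLcp_getElem? s (s.drop (i - zl)) j (by omega)
      rwa [List.getElem?_drop] at this
    have h2 : s[(i - zl) + j]? = s[zl + ((i - zl) + j)]? := by
      have := pvLcp_getElem? s (s.drop zl) ((i - zl) + j) (by omega)
      rwa [List.getElem?_drop] at this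
    rw [h1, h2]
    congr 1
    omega
  · rw [List.getElem?_eq_none (by rw [List.length_take]; omega),
      List.getElem?_eq_none (by rw [List.length_take]; omega)]

theorem pvZLoop_spec (s : List Char) : ∀ (m i : Nat) (z : List Nat) (zl zr : Nat),
    s.length - i ≤ m →
    z.length = s.length →
    (∀ j, 1 ≤ j → j < i → z.getD j 0 = pvLcp s (s.drop j)) →
    zr ≤ s.length →
    (zr = 0 ∨ (1 ≤ zl ∧ zl < i ∧ zr - zl ≤ pvLcp s (s.drop zl))) →
    1 ≤ i →
    (pvZLoop s i z zl zr).length = s.length ∧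
      ∀ j, 1 ≤ j → j < s.length → (pvZLoop s i z zl zr).getD j 0 = pvLcp s (s.drop j) := by
  intro m
  induction m with
  | zero =>
    intro i z zl zr hfuel hlen hcorr hzr hbox hi
    rw [pvZLoop, if_neg (by omega)]
    exact ⟨hlen, fun j h1 h2 => hcorr j h1 (by omega)⟩
  | succ m ih =>
    intro i z zl zr hfuel hlen hcorr hzr hbox hi
    by_cases hin : i < s.length
    · rw [pvZLoop, if_pos hin]
      have hk0 : (if i < zr then min (PySem.List.pyGetD z ((i - zl : Nat) : Int) 0) (zr - i) else 0)
          ≤ pvLcp s (s.drop i) := by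
        split_ifs with hir
        · rcases hbox with h0 | ⟨hzl1, hzli, hb⟩
          · omega
          · rw [PySem.List.pyGetD_natCast, hcorr (i - zl) (by omega) (by omega)]
            exact pvBox_bound s zl i zr (by omega) hir hzr hb
        · exact Nat.zero_le _
      have hk := pvZExtend_lcp s i _ hk0
      simp only [PySem.List.pySetD_natCast, hk]
      set L := pvLcp s (s.drop i) with hL
      have hLle : L ≤ s.length - i := by
        have := pvLcp_le_right s (s.drop i)
        rw [List.length_drop] at this
        omega
      have hlen' : (z.set i L).length = s.length := by rw [List.length_set]; exact hlen
      have hcorr' : ∀ j, 1 ≤ j → j < i + 1 → (z.set i L).getD j 0 = pvLcp s (s.drop j) := by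
        intro j h1 h2
        rcases eq_or_ne j i with rfl | hne
        · rw [List.getD_eq_getElem?_getD, List.getElem?_set_self (by omega)]; rfl
        · rw [List.getD_eq_getElem?_getD, List.getElem?_set_ne (by omega),
            ← List.getD_eq_getElem?_getD]
          exact hcorr j h1 (by omega)
      split_ifs with hupd
      · exact ih (i + 1) (z.set i L) i (i + L) (by omega) hlen' hcorr' (by omega)
          (Or.inr ⟨by omega, by omega, by omega⟩) (by omega)
      · refine ih (i + 1) (z.set i L) zl zr (by omega) hlen' hcorr' hzr ?_ (by omega)
        rcases hbox with h0 | ⟨a, b, c⟩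
        · exact Or.inl h0
        · exact Or.inr ⟨a, by omega, c⟩
    · rw [pvZLoop, if_neg hin]
      exact ⟨hlen, fun j h1 h2 => hcorr j h1 (by omega)⟩

theorem pvSlice_negneg (xs : List Char) (k j : Nat) (hk : 0 < k) (hj : 0 < j) :
    PySem.List.slice xs (some (-(k : Int))) (some (-(j : Int))) =
      (xs.drop (xs.length - k)).take ((xs.length - j) - (xs.length - k)) := by
  simp [PySem.List.slice, PySem.List.clampIdx_neg_natCast xs.length k hk,
    PySem.List.clampIdx_neg_natCast xs.length j hj]

-- A's slice condition at trailing block length l equals the Z-condition on the reversed list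
theorem pvCond_bridge (cs : List Char) (l : Nat) (h1 : 1 ≤ l) (h2 : 2 * l ≤ cs.length) :
    (PySem.List.slice cs (some (-(2 * (l : Int)))) (some (-(l : Int))) =
      PySem.List.slice cs (some (-(l : Int))) none)
    ↔ l ≤ pvLcp cs.reverse (cs.reverse.drop l) := by
  have h2l : -(2 * (l : Int)) = -(((2 * l : Nat)) : Int) := by push_cast; ring
  have e1 : PySem.List.slice cs (some (-(2 * (l : Int)))) (some (-(l : Int))) =
      (cs.drop (cs.length - 2 * l)).take l := by
    rw [h2l, pvSlice_negneg cs (2 * l) l (by omega) h1]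
    congr 1
    omega
  have e2 : PySem.List.slice cs (some (-(l : Int))) none =
      cs.drop (cs.length - l) := PySem.List.slice_from_neg_natCast cs l h1
  have e3 : cs.reverse.take l = (cs.drop (cs.length - l)).reverse := by
    rw [List.take_reverse]
  have hXlen : (cs.take (cs.length - l)).length = cs.length - l := by
    rw [List.length_take]
    omega
  have e4 : (cs.reverse.drop l).take l = ((cs.drop (cs.length - 2 * l)).take l).reverse := by
    rw [List.drop_reverse, List.take_reverse, hXlen,
      show cs.length - l - l = cs.length - 2 * l by omega, List.drop_take,
      show cs.length - l - (cs.length - 2 * l) = l by omega]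
  rw [e1, e2]
  rw [pvLcp_ge_iff]
  constructor
  · intro h
    refine ⟨by rw [List.length_reverse]; omega, by rw [List.length_drop, List.length_reverse]; omega, ?_⟩
    rw [e3, e4, h]
  · rintro ⟨-, -, h⟩
    rw [e3, e4] at h
    have := List.reverse_injective h
    exact this.symm

theorem pvALoop_append (cs : List Char) (fb : String) (xs ys : List Int) :
    pvALoop cs fb (xs ++ ys) = pvALoop cs (pvALoop cs fb ys) xs := by
  induction xs with
  | nil => simp [pvALoop]
  | cons x rest ih =>
    rw [List.cons_append]
    simp only [pvALoop]
    split_ifs with h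
    · rfl
    · exact ih

theorem pvALoop_nonpos (text : String) (ys : List Int) (h : ∀ l ∈ ys, l ≤ 0) :
    pvALoop text.toList text ys = text := by
  induction ys with
  | nil => rfl
  | cons l rest ih =>
    have hl : l ≤ 0 := h l List.mem_cons_self
    obtain ⟨m, rfl⟩ : ∃ m : Nat, l = -((m : Nat) : Int) := ⟨(-l).toNat, by omega⟩
    simp only [pvALoop]
    rw [show (-(2 * -((m : Nat) : Int)) : Int) = ((2 * m : Nat) : Int) by push_cast; ring,
      show (- -((m : Nat) : Int) : Int) = ((m : Nat) : Int) by ring,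
      PySem.List.slice_natCast, PySem.List.slice_from_natCast, PySem.List.slice_to_natCast,
      show (m - 2 * m : Nat) = 0 by omega, List.take_zero]
    split_ifs with hc
    · have hle : text.toList.length ≤ m := List.drop_eq_nil_iff.mp hc.symm
      rw [List.take_of_length_le hle, String.ofList_toList]
    · exact ih (fun x hx => h x (List.mem_cons_of_mem _ hx))

theorem pvScan_agree (text : String) (z : List Nat)
    (hz : ∀ j, 1 ≤ j → j < text.toList.length →
      z.getD j 0 = pvLcp text.toList.reverse (text.toList.reverse.drop j)) :
    ∀ (ls : List Int), (∀ l ∈ ls, 1 ≤ l ∧ 2 * l ≤ (text.toList.length : Int)) →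
      pvALoop text.toList text ls = pvScan text (text.toList.length : Int) z ls := by
  intro ls
  induction ls with
  | nil => intro _; rfl
  | cons l rest ih =>
    intro hls
    obtain ⟨hl1, hl2⟩ := hls l List.mem_cons_self
    have hcast : l = ((l.toNat : Nat) : Int) := by omega
    have hbound1 : 1 ≤ l.toNat := by omega
    have hbound2 : 2 * l.toNat ≤ text.toList.length := by omega
    have hboundn : l.toNat < text.toList.length := by omega
    have hzl : z.getD l.toNat 0 = pvLcp text.toList.reverse (text.toList.reverse.drop l.toNat) :=
      hz l.toNat hbound1 hboundn
    have hbridge := pvCond_bridge text.toList l.toNat hbound1 hbound2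
    have hpg : PySem.List.pyGetD z l 0 = z.getD l.toNat 0 :=
      PySem.List.pyGetD_of_nonneg z 0 (by omega)
    have hcondB : (l ≤ ((PySem.List.pyGetD z l 0 : Nat) : Int)) ↔
        l.toNat ≤ pvLcp text.toList.reverse (text.toList.reverse.drop l.toNat) := by
      rw [hpg, hzl]
      omega
    simp only [pvALoop, pvScan]
    by_cases hc : l.toNat ≤ pvLcp text.toList.reverse (text.toList.reverse.drop l.toNat)
    · rw [if_pos (by rw [hcast]; exact hbridge.mpr hc), if_pos (hcondB.mpr hc)]
      rw [show (-l : Int) = -((l.toNat : Nat) : Int) by omega,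
        PySem.List.slice_to_neg_natCast text.toList l.toNat hbound1,
        show ((text.toList.length : Int) - l) = ((text.toList.length - l.toNat : Nat) : Int) by omega,
        PySem.List.slice_to_natCast]
    · rw [if_neg (by rw [hcast]; exact fun hh => hc (hbridge.mp hh)),
        if_neg (fun hh => hc (hcondB.mp hh))]
      exact ih (fun x hx => hls x (List.mem_cons_of_mem _ hx))

-- ===== VERDICT (by name: the statement is the Claim_ definition above) =====
theorem remove_duplicate_trailing_spec : Claim_equal_remove_duplicate_trailing := by
  intro text min_length _
  unfold Spec_remove_duplicate_trailing
  simp only [remove_duplicate_trailing, remove_duplicate_trailing_alt]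
  have hfd : PySem.Int.floordiv ((text.toList.length : Nat) : Int) 2
      = ((text.toList.length / 2 : Nat) : Int) := by
    exact_mod_cast PySem.Int.floordiv_natCast text.toList.length 2
  have hzspec := pvZLoop_spec text.toList.reverse text.toList.reverse.length 1
    (List.replicate text.toList.length 0) 0 0 (by omega)
    (by rw [List.length_replicate, List.length_reverse])
    (by intro j h1 h2; exact absurd h1 (by omega))
    (Nat.zero_le _) (Or.inl rfl) le_rfl
  have hz := hzspec.2
  simp only [List.length_reverse] at hz
  rw [hfd]
  by_cases hA : ((text.toList.length : Nat) : Int) < 2 * min_length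
  · rw [if_pos hA]
    by_cases hm : min_length > 1
    · rw [if_pos hm, if_pos (show ((text.toList.length / 2 : Nat) : Int) < min_length by omega)]
    · rw [if_neg hm, if_pos (show ((text.toList.length / 2 : Nat) : Int) < 1 by omega)]
  · rw [if_neg hA]
    by_cases hm : min_length > 1
    · rw [if_pos hm, if_neg (show ¬ ((text.toList.length / 2 : Nat) : Int) < min_length by omega)]
      exact pvScan_agree text _ hz _
        (by intro l hl; rw [PySem.List.mem_pyRange_neg_one] at hl; constructor <;> omega)
    · rw [if_neg hm]
      by_cases hn2 : text.toList.length < 2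
      · rw [if_pos (show ((text.toList.length / 2 : Nat) : Int) < 1 by omega)]
        apply pvALoop_nonpos
        intro l hl
        rw [PySem.List.mem_pyRange_neg_one] at hl
        omega
      · rw [if_neg (show ¬ ((text.toList.length / 2 : Nat) : Int) < 1 by omega)]
        have hsplit : PySem.List.pyRange ((text.toList.length / 2 : Nat) : Int) (min_length - 1) (-1)
            = PySem.List.pyRange ((text.toList.length / 2 : Nat) : Int) 0 (-1)
              ++ PySem.List.pyRange 0 (min_length - 1) (-1) := by
          rw [PySem.List.pyRange_neg_one_eq_reverse, PySem.List.pyRange_neg_one_eq_reverse,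
            PySem.List.pyRange_neg_one_eq_reverse, ← List.reverse_append]
          congr 1
          exact PySem.List.pyRange_one_append (min_length - 1 + 1) (0 + 1)
            (((text.toList.length / 2 : Nat) : Int) + 1) (by omega) (by omega)
        rw [hsplit, pvALoop_append,
          pvALoop_nonpos text _
            (by intro l hl; rw [PySem.List.mem_pyRange_neg_one] at hl; omega),
          show ((1 : Int) - 1) = 0 from rfl]
        exact pvScan_agree text _ hz _
          (by intro l hl; rw [PySem.List.mem_pyRange_neg_one] at hl; constructor <;> omega)
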